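-- pv_equiv track=rewrite | github.com/nathnaelteshome/competative-progamming | amazonButVolumes.py | buyVolumes
-- ===== SOURCE A (Python) =====
-- def buyVolumes(volumes):
--     ans = []
--     prevAvails = set()
--     lastAvail = 0
--     for volume in volumes:
--         prevAvails.add(volume)
--         temp = []
--         while lastAvail + 1 in prevAvails:
--             lastAvail += 1
--             temp.append(lastAvail)
--         if temp:
--             ans.append(temp)
--         else:
--             ans.append([-1])
--     return ans
-- ===== SOURCE B (Python) =====
-- def buyVolumes(volumes):
--     ans = []
--     seen = set()
--     right = {}  # left endpoint of a maximal contiguous seen block -> its right endpoint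
--     left = {}   # right endpoint of a block -> its left endpoint
--     lastAvail = 0
--     for v in volumes:
--         if v in seen:
--             ans.append([-1])
--             continue
--         seen.add(v)
--         L = left.pop(v - 1, v)   # block ending just below v, if any
--         R = right.pop(v + 1, v)  # block starting just above v, if any
--         right[L] = R             # merged block [L, R]
--         left[R] = L
--         if v == lastAvail + 1:
--             ans.append(list(range(v, R + 1)))
--             lastAvail = R
--         else:
--             ans.append([-1])
--     return ans
-- ===== Notes on version B (the rewrite author's own statement) =====
-- stated objective: alternative
-- what changed: B replaces A's flat seen-set plus element-by-element inner while-scan by an interval structure: two dictionaries mapping block endpoints (left->right, right->left) let each new volume merge with its neighbouring blocks in O(1) and lastAvail jump straight to the merged block's right end.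
import Mathlib
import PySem

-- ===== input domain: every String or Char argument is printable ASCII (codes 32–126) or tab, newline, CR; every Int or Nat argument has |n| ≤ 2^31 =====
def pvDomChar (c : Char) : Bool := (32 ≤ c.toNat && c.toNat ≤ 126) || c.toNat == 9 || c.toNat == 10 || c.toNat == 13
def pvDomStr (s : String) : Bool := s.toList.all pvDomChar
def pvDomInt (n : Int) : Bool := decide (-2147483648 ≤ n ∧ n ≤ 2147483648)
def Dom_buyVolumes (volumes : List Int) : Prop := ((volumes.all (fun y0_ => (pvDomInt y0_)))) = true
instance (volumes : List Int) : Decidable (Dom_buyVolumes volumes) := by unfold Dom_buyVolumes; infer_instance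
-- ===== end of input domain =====

-- B replaces A's element-by-element inner while-scan over the seen-set by an O(1) merge of
-- maximal seen blocks kept in two endpoint dictionaries, then jumps lastAvail to the block end
-- (alternative decomposition; same amortized cost).

-- ===== PORT A =====
-- A's inner while loop: scans upward while lastAvail+1 is in the set. fuel = size of the set,
-- which always suffices because each iteration consumes a distinct member of the set.
def buyScan (s : PySem.Set Int) (last : Int) (temp : List Int) : Nat → Int × List Int
  | 0 => (last, temp)
  | fuel+1 =>
    if PySem.Set.contains s (last + 1) then buyScan s (last + 1) (temp ++ [last + 1]) fuel
    else (last, temp)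

def buyStepA (st : List (List Int) × PySem.Set Int × Int) (volume : Int) :
    List (List Int) × PySem.Set Int × Int :=
  let prev := PySem.Set.add st.2.1 volume
  let r := buyScan prev st.2.2 [] prev.length
  (st.1 ++ [if r.2.isEmpty then [-1] else r.2], prev, r.1)

def buyVolumes (volumes : List Int) : List (List Int) :=
  (volumes.foldl buyStepA ([], PySem.Set.empty, 0)).1

-- ===== PORT B =====
def buyStepB (st : List (List Int) × PySem.Set Int × PySem.Dict Int Int × PySem.Dict Int Int × Int)
    (v : Int) : List (List Int) × PySem.Set Int × PySem.Dict Int Int × PySem.Dict Int Int × Int :=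
  let (ans, seen, rt, lt, last) := st
  if PySem.Set.contains seen v then (ans ++ [[-1]], seen, rt, lt, last)
  else
    let seen := PySem.Set.add seen v
    let L := lt.getD (v - 1) v        -- left.pop(v - 1, v)
    let lt := lt.erase (v - 1)
    let R := rt.getD (v + 1) v        -- right.pop(v + 1, v)
    let rt := rt.erase (v + 1)
    let rt := rt.insert L R           -- right[L] = R
    let lt := lt.insert R L           -- left[R] = L
    if v = last + 1 then
      (ans ++ [PySem.List.pyRange v (R + 1) 1], seen, rt, lt, R)
    else (ans ++ [[-1]], seen, rt, lt, last)

def buyVolumes_alt (volumes : List Int) : List (List Int) :=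
  (volumes.foldl buyStepB ([], PySem.Set.empty, PySem.Dict.empty, PySem.Dict.empty, 0)).1

-- ===== PRECONDITION & SPEC =====
def Spec_buyVolumes (volumes : List Int) (out : List (List Int)) : Prop := out = buyVolumes_alt volumes
instance (volumes : List Int) (out : List (List Int)) : Decidable (Spec_buyVolumes volumes out) := by unfold Spec_buyVolumes; infer_instance

-- ===== CLAIM (what is proved, stated in full; the proofs are below) =====
def Claim_equal_buyVolumes : Prop := ∀ (volumes : List Int), Dom_buyVolumes volumes → Spec_buyVolumes volumes (buyVolumes volumes)

-- ===== LEMMAS AND PROOFS =====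

-- lookup in an erased dict
theorem dict_get?_erase (d : PySem.Dict Int Int) (k k' : Int) :
    (d.erase k).get? k' = if k' = k then none else d.get? k' := by
  obtain ⟨items⟩ := d
  induction items with
  | nil => simp [PySem.Dict.erase, PySem.Dict.get?]
  | cons p rest ih =>
    simp only [PySem.Dict.erase, PySem.Dict.get?, List.filter_cons] at ih ⊢
    by_cases h1 : p.1 = k <;> by_cases h2 : p.1 = k' <;> simp_all [beq_iff_eq]

-- invariant of B's endpoint dictionaries: rt maps the left endpoint of every maximal
-- contiguous block of seen values to its right endpoint, lt is its mirror, and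
-- last + 1 has not been seen yet.
def BInv (seen : PySem.Set Int) (rt lt : PySem.Dict Int Int) (last : Int) : Prop :=
  (∀ a b : Int, rt.get? a = some b →
      a ≤ b ∧ (∀ x : Int, a ≤ x → x ≤ b → x ∈ seen) ∧ (a - 1) ∉ seen ∧ (b + 1) ∉ seen) ∧
  (∀ x : Int, x ∈ seen → ∃ a b : Int, rt.get? a = some b ∧ a ≤ x ∧ x ≤ b) ∧
  (∀ a b : Int, rt.get? a = some b ↔ lt.get? b = some a) ∧
  (last + 1) ∉ seen

def GoodB (st : List (List Int) × PySem.Set Int × PySem.Dict Int Int × PySem.Dict Int Int × Int) : Prop :=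
  st.2.1.Nodup ∧ BInv st.2.1 st.2.2.1 st.2.2.2.1 st.2.2.2.2

def projB (st : List (List Int) × PySem.Set Int × PySem.Dict Int Int × PySem.Dict Int Int × Int) :
    List (List Int) × PySem.Set Int × Int := (st.1, st.2.1, st.2.2.2.2)

theorem buyScan_stop (s : PySem.Set Int) (last : Int) (temp : List Int) (fuel : Nat)
    (h : (last + 1) ∉ s) : buyScan s last temp fuel = (last, temp) := by
  cases fuel <;> simp [buyScan, PySem.Set.contains, h]

theorem buyScan_run (s : PySem.Set Int) (R : Int) :
    ∀ (fuel : Nat) (last : Int) (temp : List Int), last ≤ R →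
    (∀ x : Int, last < x → x ≤ R → x ∈ s) → (R + 1) ∉ s → (R - last).toNat ≤ fuel →
    buyScan s last temp fuel = (R, temp ++ PySem.List.pyRange (last + 1) (R + 1) 1) := by
  intro fuel
  induction fuel with
  | zero =>
    intro last temp h1 h2 h3 h4
    have he : last = R := by omega
    subst he
    simp [buyScan, PySem.List.pyRange_one_eq_nil (le_refl _)]
  | succ f ih =>
    intro last temp h1 h2 h3 h4
    by_cases he : last = R
    · subst he
      simp [buyScan, PySem.Set.contains, h3, PySem.List.pyRange_one_eq_nil (le_refl _)]
    · have hm : last + 1 ∈ s := h2 _ (by omega) (by omega)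
      rw [buyScan]
      simp only [PySem.Set.contains, List.contains_eq_mem, hm, decide_true, if_true]
      rw [ih (last + 1) (temp ++ [last + 1]) (by omega) (fun x hx1 hx2 => h2 x (by omega) hx2) h3 (by omega)]
      rw [PySem.List.pyRange_one_cons (by omega : last + 1 < R + 1)]
      simp

theorem range_length_le (s : PySem.Set Int) (a b : Int)
    (h : ∀ x : Int, a ≤ x → x < b → x ∈ s) : (b - a).toNat ≤ s.length := by
  have hsub : PySem.List.pyRange a b 1 ⊆ s := by
    intro x hx
    rw [PySem.List.mem_pyRange_one] at hx
    exact h x hx.1 hx.2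
  have := (List.subperm_of_subset (PySem.List.nodup_pyRange_one a b) hsub).length_le
  simpa [PySem.List.length_pyRange_one] using this

theorem step_coupled (st : List (List Int) × PySem.Set Int × PySem.Dict Int Int × PySem.Dict Int Int × Int)
    (v : Int) (hG : GoodB st) :
    buyStepA (projB st) v = projB (buyStepB st v) ∧ GoodB (buyStepB st v) := by
  obtain ⟨ans, S, rt, lt, last⟩ := st
  obtain ⟨hnd, hBlk, hCov, hMir, hLast⟩ := hG
  dsimp only at hnd hBlk hCov hMir hLast
  by_cases hv : v ∈ S
  · -- duplicate volume: both sides append [-1] and change nothing else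
    have hc : PySem.Set.contains S v = true := by simp [PySem.Set.contains, hv]
    constructor
    · simp [buyStepA, buyStepB, projB, hv, buyScan_stop _ _ _ _ hLast]
    · simpa [buyStepB, GoodB, hc, hv] using ⟨hnd, hBlk, hCov, hMir, hLast⟩
  · -- fresh volume: B merges the neighbouring blocks into [L, R]
    have hc : PySem.Set.contains S v = false := by simp [PySem.Set.contains, hv]
    have hadd : PySem.Set.add S v = S ++ [v] := PySem.Set.add_of_not_mem hv
    have hnd' : (S ++ [v]).Nodup := by simpa [hadd] using PySem.Set.nodup_add S v hnd
    set L := lt.getD (v - 1) v with hLdef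
    set R := rt.getD (v + 1) v with hRdef
    have Lchar : (lt.get? (v - 1) = some L ∧ rt.get? L = some (v - 1)) ∨
        (lt.get? (v - 1) = none ∧ L = v ∧ (v - 1) ∉ S) := by
      cases h : lt.get? (v - 1) with
      | none =>
        refine Or.inr ⟨rfl, by simp [hLdef, PySem.Dict.getD_eq_get?_getD, h], ?_⟩
        intro hmem
        obtain ⟨a, b, hab, ha, hb⟩ := hCov _ hmem
        have hbv : b = v - 1 := by
          by_contra hne
          exact hv ((hBlk a b hab).2.1 v (by omega) (by omega))
        rw [hbv, hMir] at hab
        simp [hab] at h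
      | some L0 =>
        have hLL : L = L0 := by simp [hLdef, PySem.Dict.getD_eq_get?_getD, h]
        rw [← hLL] at h
        exact Or.inl ⟨by rw [hLL], (hMir _ _).mpr h⟩
    have Rchar : (rt.get? (v + 1) = some R ∧ lt.get? R = some (v + 1)) ∨
        (rt.get? (v + 1) = none ∧ R = v ∧ (v + 1) ∉ S) := by
      cases h : rt.get? (v + 1) with
      | none =>
        refine Or.inr ⟨rfl, by simp [hRdef, PySem.Dict.getD_eq_get?_getD, h], ?_⟩
        intro hmem
        obtain ⟨a, b, hab, ha, hb⟩ := hCov _ hmem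
        have hav : a = v + 1 := by
          by_contra hne
          exact hv ((hBlk a b hab).2.1 v (by omega) (by omega))
        rw [hav] at hab
        simp [hab] at h
      | some R0 =>
        have hRR : R = R0 := by simp [hRdef, PySem.Dict.getD_eq_get?_getD, h]
        rw [← hRR] at h
        exact Or.inl ⟨by rw [hRR], (hMir _ _).mp h⟩
    have hLle : L ≤ v := by
      rcases Lchar with ⟨_, hb⟩ | ⟨_, he, _⟩
      · have := (hBlk _ _ hb).1; omega
      · omega
    have hRge : v ≤ R := by
      rcases Rchar with ⟨hb, _⟩ | ⟨_, he, _⟩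
      · have := (hBlk _ _ hb).1; omega
      · omega
    have hcov : ∀ x : Int, L ≤ x → x ≤ R → x ∈ S ++ [v] := by
      intro x hx1 hx2
      rcases lt_trichotomy x v with hlt | heq | hgt
      · rcases Lchar with ⟨_, hb⟩ | ⟨_, he, _⟩
        · exact List.mem_append_left _ ((hBlk _ _ hb).2.1 x hx1 (by omega))
        · omega
      · simp [heq]
      · rcases Rchar with ⟨hb, _⟩ | ⟨_, he, _⟩
        · exact List.mem_append_left _ ((hBlk _ _ hb).2.1 x (by omega) hx2)
        · omega
    have hL1 : (L - 1) ∉ S ++ [v] := by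
      simp only [List.mem_append, List.mem_singleton]
      rintro (hmem | heq)
      · rcases Lchar with ⟨_, hb⟩ | ⟨_, he, hn⟩
        · exact (hBlk _ _ hb).2.2.1 hmem
        · rw [he] at hmem; exact hn hmem
      · omega
    have hR1 : (R + 1) ∉ S ++ [v] := by
      simp only [List.mem_append, List.mem_singleton]
      rintro (hmem | heq)
      · rcases Rchar with ⟨hb, _⟩ | ⟨_, he, hn⟩
        · exact (hBlk _ _ hb).2.2.2 hmem
        · rw [he] at hmem; exact hn hmem
      · omega
    have hrt' : ∀ a : Int, (((rt.erase (v + 1)).insert L R).get? a)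
        = if a = L then some R else if a = v + 1 then none else rt.get? a := by
      intro a
      rw [PySem.Dict.get?_insert, dict_get?_erase]
    have hlt' : ∀ b : Int, (((lt.erase (v - 1)).insert R L).get? b)
        = if b = R then some L else if b = v - 1 then none else lt.get? b := by
      intro b
      rw [PySem.Dict.get?_insert, dict_get?_erase]
    have hBlk' : ∀ a b : Int, ((rt.erase (v + 1)).insert L R).get? a = some b →
        a ≤ b ∧ (∀ x : Int, a ≤ x → x ≤ b → x ∈ S ++ [v]) ∧
        (a - 1) ∉ S ++ [v] ∧ (b + 1) ∉ S ++ [v] := by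
      intro a b hab
      rw [hrt' a] at hab
      split_ifs at hab with h1 h2
      · obtain ⟨rfl⟩ := hab
        subst h1
        exact ⟨by omega, hcov, hL1, hR1⟩
      · obtain ⟨hle, hcv, hm1, hp1⟩ := hBlk a b hab
        refine ⟨hle, fun x hx1 hx2 => List.mem_append_left _ (hcv x hx1 hx2), ?_, ?_⟩
        · simp only [List.mem_append, List.mem_singleton]
          rintro (hmem | heq)
          · exact hm1 hmem
          · omega
        · simp only [List.mem_append, List.mem_singleton]
          rintro (hmem | heq)
          · exact hp1 hmem
          · have hbv : b = v - 1 := by omega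
            rw [hbv, hMir] at hab
            rcases Lchar with ⟨hsome, _⟩ | ⟨hnone, _, _⟩
            · rw [hab] at hsome; exact h1 (by injection hsome)
            · rw [hab] at hnone; exact Option.some_ne_none _ hnone
    have hCov' : ∀ x : Int, x ∈ S ++ [v] →
        ∃ a b : Int, ((rt.erase (v + 1)).insert L R).get? a = some b ∧ a ≤ x ∧ x ≤ b := by
      intro x hx
      have hmerged : ((rt.erase (v + 1)).insert L R).get? L = some R := by
        rw [hrt' L]; simp
      rcases List.mem_append.mp hx with hxS | hxv
      · obtain ⟨a, b, hab, ha, hb⟩ := hCov x hxS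
        by_cases haL : a = L
        · subst haL
          rcases Lchar with ⟨_, hsome⟩ | ⟨_, he, _⟩
          · rw [hab] at hsome
            have hbv : b = v - 1 := Option.some.inj hsome
            exact ⟨L, R, hmerged, ha, by omega⟩
          · exfalso
            exact hv (by simpa [he] using (hBlk _ _ hab).2.1 v (by omega) (by omega))
        · by_cases hav : a = v + 1
          · subst hav
            rcases Rchar with ⟨hsome, _⟩ | ⟨hnone, _, _⟩
            · rw [hab] at hsome
              have hbR : b = R := Option.some.inj hsome
              exact ⟨L, R, hmerged, by omega, by omega⟩
            · rw [hab] at hnone; exact absurd hnone (Option.some_ne_none _)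
          · exact ⟨a, b, by rw [hrt' a]; simp [haL, hav, hab], ha, hb⟩
      · have hxv' : x = v := by simpa using hxv
        exact ⟨L, R, hmerged, by omega, by omega⟩
    have hMir' : ∀ a b : Int, (((rt.erase (v + 1)).insert L R).get? a = some b ↔
        ((lt.erase (v - 1)).insert R L).get? b = some a) := by
      intro a b
      rw [hrt' a, hlt' b]
      constructor
      · intro h
        by_cases h1 : a = L
        · rw [h1, if_pos rfl] at h
          have hbR : R = b := by injection h
          rw [← hbR, if_pos rfl, h1]
        · rw [if_neg h1] at h
          by_cases h2 : a = v + 1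
          · rw [if_pos h2] at h; exact absurd h (by simp)
          · rw [if_neg h2] at h
            have hlb : lt.get? b = some a := (hMir a b).mp h
            have hbR : b ≠ R := by
              intro hbR
              rw [hbR] at hlb
              rcases Rchar with ⟨_, hsome⟩ | ⟨_, he, _⟩
              · rw [hlb] at hsome
                injection hsome with he'
                exact h2 he'
              · rw [he] at hlb
                have hra : rt.get? a = some v := (hMir a v).mpr hlb
                exact hv ((hBlk _ _ hra).2.1 v (by have := (hBlk _ _ hra).1; omega) (by omega))
            have hbv : b ≠ v - 1 := by
              intro hbv
              rw [hbv] at hlb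
              rcases Lchar with ⟨hsome, _⟩ | ⟨hnone, _, _⟩
              · rw [hlb] at hsome
                injection hsome with he'
                exact h1 he'
              · rw [hlb] at hnone
                exact absurd hnone (by simp)
            rw [if_neg hbR, if_neg hbv]
            exact hlb
      · intro h
        by_cases h1 : b = R
        · rw [h1, if_pos rfl] at h
          have haL : L = a := by injection h
          rw [← haL, if_pos rfl, h1]
        · rw [if_neg h1] at h
          by_cases h2 : b = v - 1
          · rw [if_pos h2] at h; exact absurd h (by simp)
          · rw [if_neg h2] at h
            have hra : rt.get? a = some b := (hMir a b).mpr h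
            have haL : a ≠ L := by
              intro haL
              rw [haL] at hra
              rcases Lchar with ⟨_, hsome⟩ | ⟨_, he, _⟩
              · rw [hra] at hsome
                injection hsome with he'
                exact h2 he'
              · rw [he] at hra
                exact hv ((hBlk _ _ hra).2.1 v (by omega) (by have := (hBlk _ _ hra).1; omega))
            have hav : a ≠ v + 1 := by
              intro hav
              rw [hav] at hra
              rcases Rchar with ⟨hsome, _⟩ | ⟨hnone, _, _⟩
              · rw [hra] at hsome
                injection hsome with he'
                exact h1 he'
              · rw [hra] at hnone
                exact absurd hnone (by simp)
            rw [if_neg haL, if_neg hav]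
            exact hra
    by_cases hvl : v = last + 1
    · -- the new volume continues the run: A scans up to R, B jumps to R at once
      subst hvl
      have hscan : buyScan (S ++ [last + 1]) last [] (S ++ [last + 1]).length
          = (R, [] ++ PySem.List.pyRange (last + 1) (R + 1) 1) := by
        apply buyScan_run (S ++ [last + 1]) R _ last [] (by omega)
          (fun x hx1 hx2 => hcov x (by omega) hx2) hR1
        have := range_length_le (S ++ [last + 1]) (last + 1) (R + 1)
          (fun x hx1 hx2 => hcov x (by omega) (by omega))
        omega
      have hBeq : buyStepB (ans, S, rt, lt, last) (last + 1)
          = (ans ++ [PySem.List.pyRange (last + 1) (R + 1) 1], S ++ [last + 1],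
             (rt.erase (last + 1 + 1)).insert L R, (lt.erase (last + 1 - 1)).insert R L, R) := by
        simp only [buyStepB, hc, Bool.false_eq_true, if_false]
        rw [← hLdef, ← hRdef, hadd]
        simp
      constructor
      · rw [hBeq]
        simp only [buyStepA, projB]
        rw [hadd, hscan, List.nil_append]
        rw [PySem.List.pyRange_one_cons (by omega : last + 1 < R + 1)]
        simp
      · rw [hBeq]
        exact ⟨hnd', hBlk', hCov', hMir', hR1⟩
    · -- the run cannot advance: lastAvail + 1 is still unseen on both sides
      have hstop : (last + 1) ∉ S ++ [v] := by
        simp only [List.mem_append, List.mem_singleton]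
        rintro (hmem | heq)
        · exact hLast hmem
        · omega
      have hBeq : buyStepB (ans, S, rt, lt, last) v
          = (ans ++ [[-1]], S ++ [v],
             (rt.erase (v + 1)).insert L R, (lt.erase (v - 1)).insert R L, last) := by
        simp only [buyStepB, hc, Bool.false_eq_true, if_false, if_neg hvl]
        rw [← hLdef, ← hRdef, hadd]
      constructor
      · rw [hBeq]
        simp only [buyStepA, projB]
        rw [hadd, buyScan_stop _ _ _ _ hstop]
        simp
      · rw [hBeq]
        exact ⟨hnd', hBlk', hCov', hMir', hstop⟩

theorem fold_coupled (l : List Int)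
    (st : List (List Int) × PySem.Set Int × PySem.Dict Int Int × PySem.Dict Int Int × Int)
    (hG : GoodB st) :
    List.foldl buyStepA (projB st) l = projB (List.foldl buyStepB st l) := by
  induction l generalizing st with
  | nil => rfl
  | cons v l ih =>
    obtain ⟨hstep, hG'⟩ := step_coupled st v hG
    simp only [List.foldl_cons, hstep, ih _ hG']

-- ===== VERDICT (by name: the statement is the Claim_ definition above) =====
theorem buyVolumes_spec : Claim_equal_buyVolumes := by
  intro volumes _
  unfold Spec_buyVolumes buyVolumes buyVolumes_alt
  have h0 : GoodB ([], PySem.Set.empty, PySem.Dict.empty, PySem.Dict.empty, 0) := by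
    refine ⟨List.nodup_nil, ?_, ?_, ?_, ?_⟩ <;>
      simp [PySem.Dict.get?_empty, PySem.Set.empty]
  rw [show ([], PySem.Set.empty, (0:Int)) = projB ([], PySem.Set.empty, PySem.Dict.empty, PySem.Dict.empty, 0) from rfl, fold_coupled volumes _ h0]
  simp [projB]
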